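-- pv_equiv track=rewrite | github.com/axmszr/pancake | bakery/sieve.py | fits_in_pool
-- ===== SOURCE A (Python) =====
-- def get_letter_counts(word):
-- 	counts = {}
-- 	for letter in word:
-- 		if not letter.isalpha():
-- 			continue
-- 		let = letter.upper()
-- 		if let not in counts:
-- 			counts[let] = 0
-- 		counts[let] += 1
-- 	return counts
--
-- def fits_in_pool(word, letter_pool):
-- 	counts = get_letter_counts(word)
-- 	for letter in counts:
-- 		if letter not in letter_pool:
-- 			return False
-- 		if counts[letter] > letter_pool[letter]:
-- 			return False
-- 	else:
-- 		return True
-- ===== SOURCE B (Python) =====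
-- def fits_in_pool(word, letter_pool):
--     remaining = dict(letter_pool)
--     for ch in word:
--         if not ch.isalpha():
--             continue
--         let = ch.upper()
--         if let not in remaining:
--             return False
--         remaining[let] -= 1
--         if remaining[let] < 0:
--             return False
--     return True
-- ===== Notes on version B (the rewrite author's own statement) =====
-- stated objective: faster
-- what changed: Replaces A's two-phase count-all-then-compare (build a letter-count dict over the whole word, then check every counted letter against the pool) with a single streaming pass over the word that decrements a working copy of the pool and exits early on the first letter that is missing or exhausted.
import Mathlib
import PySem

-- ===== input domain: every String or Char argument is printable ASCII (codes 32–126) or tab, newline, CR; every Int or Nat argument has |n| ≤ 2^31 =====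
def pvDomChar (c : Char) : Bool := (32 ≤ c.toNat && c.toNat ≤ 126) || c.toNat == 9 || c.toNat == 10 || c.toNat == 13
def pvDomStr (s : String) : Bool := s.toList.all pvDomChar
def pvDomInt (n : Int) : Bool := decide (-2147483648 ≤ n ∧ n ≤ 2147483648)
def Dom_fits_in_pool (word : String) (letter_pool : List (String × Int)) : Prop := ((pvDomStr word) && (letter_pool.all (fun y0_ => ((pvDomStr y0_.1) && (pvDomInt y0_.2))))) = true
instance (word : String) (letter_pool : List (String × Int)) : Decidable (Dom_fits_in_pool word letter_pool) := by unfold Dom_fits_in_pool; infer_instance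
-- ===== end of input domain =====

-- B replaces A's count-then-compare two-phase check by a single streaming pass that
-- decrements a working copy of the pool with early exit (measured faster in a timing run).


-- ===== PORT A =====
-- get_letter_counts: counts = {}; for letter in word: skip non-alpha; let = letter.upper();
--   if let not in counts: counts[let] = 0; counts[let] += 1
def get_letter_counts (word : String) : PySem.Dict String Int :=
  word.toList.foldl
    (fun counts letter =>
      if !PySem.Chars.isalpha letter then counts
      else
        let l := String.mk [PySem.Chars.upperChar letter]
        let counts := if counts.contains l then counts else counts.insert l 0
        counts.modify l 0 (· + 1))
    PySem.Dict.empty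

-- the 'for letter in counts' loop with its two early returns
def fitsLoopA (counts pool : PySem.Dict String Int) : List String → Bool
  | [] => true
  | k :: rest =>
    if !pool.contains k then false
    else if counts.getD k 0 > pool.getD k 0 then false
    else fitsLoopA counts pool rest

def fits_in_pool (word : String) (letter_pool : List (String × Int)) : Bool :=
  let pool := PySem.Dict.ofList letter_pool
  let counts := get_letter_counts word
  fitsLoopA counts pool counts.keys

-- ===== PORT B =====
-- single pass over word against remaining = dict(letter_pool), early exit
def fitsLoopB (remaining : PySem.Dict String Int) : List Char → Bool
  | [] => true
  | ch :: rest =>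
    if !PySem.Chars.isalpha ch then fitsLoopB remaining rest
    else
      let l := String.mk [PySem.Chars.upperChar ch]
      if !remaining.contains l then false
      else
        let remaining := remaining.insert l (remaining.getD l 0 - 1)
        if remaining.getD l 0 < 0 then false
        else fitsLoopB remaining rest

def fits_in_pool_alt (word : String) (letter_pool : List (String × Int)) : Bool :=
  fitsLoopB (PySem.Dict.ofList letter_pool) word.toList

-- ===== PRECONDITION & SPEC =====
def Spec_fits_in_pool (word : String) (letter_pool : List (String × Int)) (out : Bool) : Prop := out = fits_in_pool_alt word letter_pool
instance (word : String) (letter_pool : List (String × Int)) (out : Bool) : Decidable (Spec_fits_in_pool word letter_pool out) := by unfold Spec_fits_in_pool; infer_instance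

-- ===== CLAIM (what is proved, stated in full; the proofs are below) =====
def Claim_equal_fits_in_pool : Prop := ∀ (word : String) (letter_pool : List (String × Int)), Dom_fits_in_pool word letter_pool → Spec_fits_in_pool word letter_pool (fits_in_pool word letter_pool)

-- ===== LEMMAS AND PROOFS =====

-- the sequence of (uppercased) pool keys the word demands
def demand (cs : List Char) : List String :=
  (cs.filter (fun c => PySem.Chars.isalpha c)).map (fun c => String.mk [PySem.Chars.upperChar c])

theorem count_cons_ne (a b : String) (l : List String) (h : b ≠ a) :
    (a :: l).count b = l.count b := by
  simp [Ne.symm h]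

theorem fitsLoopB_spec (cs : List Char) (d : PySem.Dict String Int) :
    fitsLoopB d cs = true ↔ ∀ l ∈ demand cs, d.contains l = true ∧ ((demand cs).count l : Int) ≤ d.getD l 0 := by
  induction cs generalizing d with
  | nil => simp [fitsLoopB, demand]
  | cons ch rest ih =>
    by_cases ha : PySem.Chars.isalpha ch = true
    · simp only [fitsLoopB, ha, Bool.not_true, Bool.false_eq_true, if_false]
      set l := String.mk [PySem.Chars.upperChar ch] with hl
      have hd : demand (ch :: rest) = l :: demand rest := by
        simp [demand, ha, hl]
      by_cases hc : d.contains l = true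
      · simp only [hc, Bool.not_true, Bool.false_eq_true, if_false,
          PySem.Dict.getD_insert_self]
        by_cases hneg : d.getD l 0 - 1 < 0
        · simp only [hneg, if_true]
          constructor
          · intro h; exact absurd h (by simp)
          · intro h
            have hm : l ∈ demand (ch :: rest) := by rw [hd]; exact List.mem_cons_self
            have h1 := (h l hm).2
            have hcnt : (1 : Int) ≤ ((demand (ch :: rest)).count l : Int) := by
              have := List.count_pos_iff.mpr hm
              exact_mod_cast this
            omega
        · simp only [hneg, if_false, ih]
          constructor
          · intro h x hx
            rw [hd] at hx
            rcases List.mem_cons.mp hx with hx1 | hx2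
            · subst hx1
              refine ⟨hc, ?_⟩
              rw [hd]
              by_cases hm : l ∈ demand rest
              · have := (h l hm).2
                rw [PySem.Dict.getD_insert_self] at this
                simp only [List.count_cons_self]
                push_cast
                omega
              · simp only [List.count_cons_self, List.count_eq_zero_of_not_mem hm]
                push_cast
                omega
            · have := h x hx2
              by_cases hxl : x = l
              · subst hxl
                refine ⟨hc, ?_⟩
                rw [PySem.Dict.getD_insert_self] at this
                rw [hd]
                simp only [List.count_cons_self]
                push_cast
                omega
              · have hbeq : (x == l) = false := by simp [hxl]
                rw [PySem.Dict.getD_insert (d := d)] at this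
                rw [PySem.Dict.contains_insert] at this
                simp only [hxl, if_false, hbeq, Bool.false_or] at this
                refine ⟨this.1, ?_⟩
                rw [hd, count_cons_ne _ _ _ hxl]
                exact this.2
          · intro h x hx
            by_cases hxl : x = l
            · subst hxl
              have := h l (by rw [hd]; exact List.mem_cons_self)
              refine ⟨by rw [PySem.Dict.contains_insert]; simp, ?_⟩
              rw [PySem.Dict.getD_insert_self]
              rw [hd, List.count_cons_self] at this
              push_cast at this ⊢
              omega
            · have hbeq : (x == l) = false := by simp [hxl]
              have := h x (by rw [hd]; exact List.mem_cons_of_mem _ hx)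
              rw [PySem.Dict.contains_insert, PySem.Dict.getD_insert (d := d)]
              simp only [hxl, if_false, hbeq, Bool.false_or]
              rw [hd, count_cons_ne _ _ _ hxl] at this
              exact this
      · simp only [Bool.not_eq_true] at hc
        rw [hc]
        simp only [Bool.not_false, if_true, Bool.false_eq_true, false_iff]
        intro h
        have := (h l (by rw [hd]; exact List.mem_cons_self)).1
        rw [hc] at this
        exact Bool.false_ne_true this
    · have ha' : PySem.Chars.isalpha ch = false := by simpa using ha
      have hd : demand (ch :: rest) = demand rest := by
        simp [demand, ha']
      simp only [fitsLoopB, ha', Bool.not_false, if_true, hd, ih]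

theorem fitsLoopA_spec (counts pool : PySem.Dict String Int) (ks : List String) :
    fitsLoopA counts pool ks = true ↔ ∀ k ∈ ks, pool.contains k = true ∧ counts.getD k 0 ≤ pool.getD k 0 := by
  induction ks with
  | nil => simp [fitsLoopA]
  | cons k rest ih =>
    simp only [fitsLoopA]
    by_cases hc : pool.contains k = true
    · simp only [hc, Bool.not_true, Bool.false_eq_true, if_false]
      by_cases hgt : counts.getD k 0 > pool.getD k 0
      · simp only [hgt, if_true, Bool.false_eq_true, false_iff]
        intro h
        have := (h k List.mem_cons_self).2
        omega
      · simp only [hgt, if_false, ih, List.mem_cons]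
        constructor
        · rintro h x (rfl | hx)
          · exact ⟨hc, by omega⟩
          · exact h x hx
        · intro h x hx
          exact h x (Or.inr hx)
    · simp only [Bool.not_eq_true] at hc
      rw [hc]
      simp only [Bool.not_false, if_true, Bool.false_eq_true, false_iff]
      intro h
      have := (h k List.mem_cons_self).1
      rw [hc] at this
      exact Bool.false_ne_true this

-- the body of get_letter_counts's loop shifts every lookup by the demanded count
theorem countsFold_getD (cs : List Char) (d : PySem.Dict String Int) (k : String) :
    (cs.foldl
      (fun counts letter =>
        if !PySem.Chars.isalpha letter then counts
        else
          let l := String.mk [PySem.Chars.upperChar letter]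
          let counts := if counts.contains l then counts else counts.insert l 0
          counts.modify l 0 (· + 1)) d).getD k 0
      = d.getD k 0 + ((demand cs).count k : Int) := by
  induction cs generalizing d with
  | nil => simp [demand]
  | cons ch rest ih =>
    by_cases ha : PySem.Chars.isalpha ch = true
    · simp only [List.foldl_cons, ha, Bool.not_true, Bool.false_eq_true, if_false]
      rw [ih]
      set l := String.mk [PySem.Chars.upperChar ch] with hl
      have hd : demand (ch :: rest) = l :: demand rest := by
        simp [demand, ha, hl]
      have hstep :
          ((if d.contains l then d else d.insert l 0).modify l 0 (· + 1)).getD k 0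
            = d.getD k 0 + (if k = l then 1 else 0) := by
        by_cases hc : d.contains l = true
        · simp only [hc, if_true, PySem.Dict.getD_modify]
          by_cases hkl : k = l <;> simp [hkl]
        · simp only [Bool.not_eq_true] at hc
          rw [hc]
          simp only [Bool.false_eq_true, if_false, PySem.Dict.getD_modify,
            PySem.Dict.getD_insert]
          have h0 : d.getD l 0 = 0 := PySem.Dict.getD_of_not_contains _ _ hc
          by_cases hkl : k = l <;> simp [hkl, h0]
      rw [hstep, hd]
      by_cases hkl : k = l
      · subst hkl
        rw [List.count_cons_self]
        simp only [if_pos rfl]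
        push_cast
        omega
      · rw [count_cons_ne _ _ _ hkl]; simp [hkl]
    · have ha' : PySem.Chars.isalpha ch = false := by simpa using ha
      have hd : demand (ch :: rest) = demand rest := by
        simp [demand, ha']
      simp only [List.foldl_cons, ha', Bool.not_false, if_true, hd, ih]

theorem countsFold_contains (cs : List Char) (d : PySem.Dict String Int) (k : String) :
    (cs.foldl
      (fun counts letter =>
        if !PySem.Chars.isalpha letter then counts
        else
          let l := String.mk [PySem.Chars.upperChar letter]
          let counts := if counts.contains l then counts else counts.insert l 0
          counts.modify l 0 (· + 1)) d).contains k
      = (d.contains k || decide (k ∈ demand cs)) := by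
  induction cs generalizing d with
  | nil => simp [demand]
  | cons ch rest ih =>
    by_cases ha : PySem.Chars.isalpha ch = true
    · simp only [List.foldl_cons, ha, Bool.not_true, Bool.false_eq_true, if_false]
      rw [ih]
      set l := String.mk [PySem.Chars.upperChar ch] with hl
      have hd : demand (ch :: rest) = l :: demand rest := by
        simp [demand, ha, hl]
      have hstep :
          ((if d.contains l then d else d.insert l 0).modify l 0 (· + 1)).contains k
            = (d.contains k || decide (k = l)) := by
        by_cases hc : d.contains l = true
        · simp only [hc, if_true, PySem.Dict.contains_modify]
          by_cases hkl : k = l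
          · subst hkl; simp [hc]
          · simp [hkl]
        · simp only [Bool.not_eq_true] at hc
          rw [hc]
          simp only [Bool.false_eq_true, if_false, PySem.Dict.contains_modify,
            PySem.Dict.contains_insert]
          by_cases hkl : k = l <;> simp [hkl]
      rw [hstep, hd]
      simp only [List.mem_cons]
      by_cases hkl : k = l <;> simp [hkl, Bool.or_comm]
    · have ha' : PySem.Chars.isalpha ch = false := by simpa using ha
      have hd : demand (ch :: rest) = demand rest := by
        simp [demand, ha']
      simp only [List.foldl_cons, ha', Bool.not_false, if_true, hd, ih]

theorem get_letter_counts_getD (word : String) (k : String) :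
    (get_letter_counts word).getD k 0 = ((demand word.toList).count k : Int) := by
  unfold get_letter_counts
  rw [countsFold_getD]
  simp [PySem.Dict.getD_empty]

theorem get_letter_counts_mem_keys (word : String) (k : String) :
    k ∈ (get_letter_counts word).keys ↔ k ∈ demand word.toList := by
  rw [← PySem.Dict.contains_iff_mem_keys]
  unfold get_letter_counts
  rw [countsFold_contains]
  simp [PySem.Dict.contains_empty]

-- ===== VERDICT (by name: the statement is the Claim_ definition above) =====
theorem fits_in_pool_spec : Claim_equal_fits_in_pool := by
  intro word lp _
  unfold Spec_fits_in_pool fits_in_pool fits_in_pool_alt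
  rw [Bool.eq_iff_iff]
  rw [fitsLoopA_spec, fitsLoopB_spec]
  constructor
  · intro h x hx
    have := h x ((get_letter_counts_mem_keys word x).mpr hx)
    rw [get_letter_counts_getD] at this
    exact this
  · intro h x hx
    have := h x ((get_letter_counts_mem_keys word x).mp hx)
    rw [get_letter_counts_getD]
    exact this
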